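-- pv_equiv track=rewrite | github.com/miliar/Code_Jam_Webscraper | Solutions_python/Problem_181/1251.py | foo
-- ===== SOURCE A (Python) =====
-- def foo(ss):
-- 	resStr = [ss[0]]
-- 	temp = ss[0]
-- 	for idx in range(1,len(ss)):
-- 		if ss[idx] < temp:
-- 			resStr.append(ss[idx])
-- 		else:
-- 			resStr.insert(0, ss[idx])
-- 			temp = ss[idx]
-- 	return ''.join(resStr)
-- ===== SOURCE B (Python) =====
-- def foo(ss):
--     # Divide and conquer: chars that reach a new running maximum ("records")
--     # go to the front (in reverse), the rest to the back. For a segment, the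
--     # records are independent of the rest of the string given the max of
--     # everything before it, so halves can be solved recursively and merged.
--     def solve(s, bound):
--         # (records, others) of segment s, where a char is a record iff it is
--         # >= bound and >= every char before it within s.
--         if len(s) <= 1:
--             if not s:
--                 return [], []
--             return ([s[0]], []) if s[0] >= bound else ([], [s[0]])
--         m = len(s) // 2
--         left, right = s[:m], s[m:]
--         r1, o1 = solve(left, bound)
--         r2, o2 = solve(right, max(bound, max(left)))
--         return r1 + r2, o1 + o2
--
--     rec, oth = solve(ss[1:], ss[0])
--     return ''.join(reversed(rec)) + ss[0] + ''.join(oth)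
-- ===== Notes on version B (the rewrite author's own statement) =====
-- stated objective: faster
-- what changed: Replaces A's single left-to-right scan with repeated insert(0) on one list (quadratic) by a divide-and-conquer recursion: each half is solved independently given the maximum of everything before it, and the (records, others) pairs of the halves are concatenated; the result is reversed records + first char + others.
import Mathlib
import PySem

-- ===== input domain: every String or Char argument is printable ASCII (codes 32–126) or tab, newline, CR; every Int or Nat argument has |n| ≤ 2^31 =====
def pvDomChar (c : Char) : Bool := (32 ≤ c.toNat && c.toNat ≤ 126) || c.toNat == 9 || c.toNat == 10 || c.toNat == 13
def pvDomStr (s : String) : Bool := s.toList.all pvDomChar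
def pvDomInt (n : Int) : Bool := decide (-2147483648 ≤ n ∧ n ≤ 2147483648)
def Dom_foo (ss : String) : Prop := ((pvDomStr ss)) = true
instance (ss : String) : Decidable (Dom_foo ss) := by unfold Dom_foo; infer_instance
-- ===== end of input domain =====

-- B replaces A's linear scan with insert-at-front on one list (quadratic) by a
-- divide-and-conquer recursion solving each half given the max of everything before it.

-- ===== PORT A =====
-- A: resStr starts as [ss[0]]; each later char is appended if smaller than the running
-- max temp, else inserted at position 0 and temp is updated; join at the end.
def foo (ss : String) : String :=
  match ss.toList with
  | [] => ""  -- unreachable under Pre_foo (Python A raises IndexError on "")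
  | c :: rest =>
    let st := rest.foldl
      (fun (st : List Char × Char) x =>
        if x < st.2 then (st.1 ++ [x], st.2) else (x :: st.1, x))
      ([c], c)
    String.ofList st.1

-- ===== PORT B =====
-- B's solve: (records, others) of a segment s, where a char is a record iff it is
-- ≥ bound and ≥ every char before it within s; halves solved recursively and merged.
def fooSolve (s : List Char) (bound : Char) : List Char × List Char :=
  if _h : s.length ≤ 1 then
    match s with
    | [] => ([], [])
    | c :: _ => if bound ≤ c then ([c], []) else ([], [c])
  else
    let m := s.length / 2
    let left := s.take m
    let right := s.drop m
    let p1 := fooSolve left bound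
    let p2 := fooSolve right (max bound ((PySem.List.max? left (fun y => y)).getD bound))
    (p1.1 ++ p2.1, p1.2 ++ p2.2)
termination_by s.length
decreasing_by
  · simp only [List.length_take]; omega
  · simp only [List.length_drop]; omega

def foo_alt (ss : String) : String :=
  match ss.toList with
  | [] => ""  -- unreachable under Pre_foo (Python B raises IndexError at ss[0] on "")
  | c :: rest =>
    let p := fooSolve rest c
    String.ofList (p.1.reverse ++ c :: p.2)

-- ===== PRECONDITION & SPEC =====
-- Pre_foo excludes only the empty string, on which Python A raises IndexError at ss[0].
def Pre_foo (ss : String) : Prop := ss ≠ ""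
instance (ss : String) : Decidable (Pre_foo ss) := by unfold Pre_foo; infer_instance
def pvWitness_foo : String := "ba"

def Spec_foo (ss : String) (out : String) : Prop := out = foo_alt ss
instance (ss : String) (out : String) : Decidable (Spec_foo ss out) := by unfold Spec_foo; infer_instance

-- ===== CLAIM (what is proved, stated in full; the proofs are below) =====
def Claim_equal_foo : Prop := ∀ (ss : String), Dom_foo ss → Pre_foo ss → Spec_foo ss (foo ss)

-- ===== LEMMAS AND PROOFS =====

-- The reference loop (proof device): one pass collecting (records, others, running max).
def fooStep (st : List Char × List Char × Char) (x : Char) : List Char × List Char × Char :=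
  if x < st.2.2 then (st.1, st.2.1 ++ [x], st.2.2) else (st.1 ++ [x], st.2.1, x)

def fooLoop (s : List Char) (t : Char) : List Char × List Char × Char :=
  s.foldl fooStep ([], [], t)

-- A's single list is reversed-records ++ c :: others throughout.
theorem foo_loop_eq (rest : List Char) (c : Char) (front back : List Char) (t : Char) :
    (rest.foldl
      (fun (st : List Char × Char) x =>
        if x < st.2 then (st.1 ++ [x], st.2) else (x :: st.1, x))
      (front.reverse ++ c :: back, t)).1
    = (let st := rest.foldl fooStep (front, back, t)
       st.1.reverse ++ c :: st.2.1) := by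
  induction rest generalizing front back t with
  | nil => simp
  | cons x xs ih =>
    simp only [List.foldl_cons, fooStep]
    by_cases h : x < t
    · simpa [h, List.append_assoc] using ih front (back ++ [x]) t
    · simpa [h] using ih (front ++ [x]) back x

-- The fold only appends to the two lists.
theorem fooLoop_shift (s : List Char) (f b : List Char) (t : Char) :
    s.foldl fooStep (f, b, t)
      = (f ++ (fooLoop s t).1, b ++ (fooLoop s t).2.1, (fooLoop s t).2.2) := by
  induction s generalizing f b t with
  | nil => simp [fooLoop]
  | cons x xs ih =>
    simp only [fooLoop, List.foldl_cons, fooStep]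
    by_cases h : x < t
    · simp only [h, if_pos]
      rw [ih f (b ++ [x]) t, ih [] ([] ++ [x]) t]
      simp
    · simp only [h, if_neg, not_false_iff]
      rw [ih (f ++ [x]) b x, ih ([] ++ [x]) [] x]
      simp

-- The running max is foldl max.
theorem fooLoop_temp (s : List Char) (t : Char) :
    (fooLoop s t).2.2 = s.foldl max t := by
  induction s generalizing t with
  | nil => simp [fooLoop]
  | cons x xs ih =>
    simp only [fooLoop, List.foldl_cons, fooStep]
    by_cases h : x < t
    · rw [if_pos h, show (max t x) = t from max_eq_left (le_of_lt h), fooLoop_shift]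
      exact ih t
    · rw [if_neg h, show (max t x) = x from max_eq_right (le_of_not_gt h), fooLoop_shift]
      exact ih x

theorem foldl_max_max (t : List Char) (a b : Char) :
    t.foldl max (max a b) = max a (t.foldl max b) := by
  induction t generalizing b with
  | nil => rfl
  | cons x xs ih =>
    simp only [List.foldl_cons]
    rw [max_assoc, ih]

-- The reference loop over a concatenation: the right half starts from the left half's max.
theorem fooLoop_append (L R : List Char) (t : Char) :
    fooLoop (L ++ R) t
      = ((fooLoop L t).1 ++ (fooLoop R (L.foldl max t)).1,
         (fooLoop L t).2.1 ++ (fooLoop R (L.foldl max t)).2.1,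
         (fooLoop R (L.foldl max t)).2.2) := by
  unfold fooLoop
  rw [List.foldl_append]
  rcases hl : List.foldl fooStep ([], [], t) L with ⟨f1, b1, t1⟩
  have ht1 : t1 = L.foldl max t := by
    have h := fooLoop_temp L t
    rw [fooLoop, hl] at h
    exact h
  rw [fooLoop_shift R f1 b1 t1, ht1, fooLoop]

-- B's divide-and-conquer computes the first two components of the reference loop.
theorem fooSolve_eq_loop_aux (n : ℕ) :
    ∀ (s : List Char), s.length ≤ n → ∀ (bound : Char),
      fooSolve s bound = ((fooLoop s bound).1, (fooLoop s bound).2.1) := by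
  induction n with
  | zero =>
    intro s hs bound
    cases s with
    | nil => simp [fooSolve, fooLoop]
    | cons c rest => simp at hs
  | succ n ih =>
    intro s hs bound
    by_cases h : s.length ≤ 1
    · match s with
      | [] => simp [fooSolve, fooLoop]
      | [c] =>
        by_cases hc : bound ≤ c
        · simp [fooSolve, fooLoop, fooStep, hc, not_lt.mpr hc]
        · simp [fooSolve, fooLoop, fooStep, hc, not_le.mp hc]
      | c :: d :: rest => simp at h
    · rw [fooSolve, dif_neg h]
      have hLlen : (s.take (s.length / 2)).length ≤ n := by
        simp only [List.length_take]; omega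
      have hRlen : (s.drop (s.length / 2)).length ≤ n := by
        simp only [List.length_drop]; omega
      have hLne : s.take (s.length / 2) ≠ [] := by
        intro hnil
        have := congrArg List.length hnil
        simp only [List.length_take, List.length_nil] at this
        omega
      have hbound : max bound ((PySem.List.max? (s.take (s.length / 2)) (fun y => y)).getD bound)
          = (s.take (s.length / 2)).foldl max bound := by
        rcases hL : s.take (s.length / 2) with _ | ⟨l0, lt⟩
        · exact absurd hL hLne
        · rw [PySem.List.max?_id_cons]
          simp only [Option.getD_some, List.foldl_cons]
          rw [foldl_max_max]
      show ((fooSolve (s.take (s.length / 2)) bound).1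
              ++ (fooSolve (s.drop (s.length / 2))
                    (max bound ((PySem.List.max? (s.take (s.length / 2)) (fun y => y)).getD bound))).1,
            (fooSolve (s.take (s.length / 2)) bound).2
              ++ (fooSolve (s.drop (s.length / 2))
                    (max bound ((PySem.List.max? (s.take (s.length / 2)) (fun y => y)).getD bound))).2)
          = ((fooLoop s bound).1, (fooLoop s bound).2.1)
      rw [ih _ hLlen bound, ih _ hRlen _, hbound]
      conv_rhs => rw [← List.take_append_drop (s.length / 2) s]
      rw [fooLoop_append]

theorem fooSolve_eq_loop (s : List Char) (bound : Char) :
    fooSolve s bound = ((fooLoop s bound).1, (fooLoop s bound).2.1) :=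
  fooSolve_eq_loop_aux s.length s le_rfl bound

-- ===== VERDICT (by name: the statement is the Claim_ definition above) =====
theorem foo_spec : Claim_equal_foo := by
  intro ss _ hpre
  unfold Spec_foo
  rcases h : ss.toList with _ | ⟨c, rest⟩
  · exact absurd (String.toList_eq_nil_iff.mp h) hpre
  · simp only [foo, foo_alt, h]
    rw [fooSolve_eq_loop]
    exact congrArg String.ofList (by simpa using foo_loop_eq rest c [] [] c)
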